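-- pv_equiv track=rewrite | github.com/mpilhlt/grobid-footnote-flavour | scripts/download-sample-pdfs.py | get_journal_download_stats
-- ===== SOURCE A (Python) =====
-- from collections import defaultdict
--
-- def get_journal_download_stats(rows):
--     """Get download statistics for each journal."""
--     journal_stats = defaultdict(lambda: {'total': 0, 'downloaded': 0})
--
--     for row in rows:
--         journal = row['journal']
--         journal_stats[journal]['total'] += 1
--         if row.get('downloaded', '').lower() == 'yes':
--             journal_stats[journal]['downloaded'] += 1
--
--     return journal_stats
-- ===== SOURCE B (Python) =====
-- from collections import defaultdict
--
-- def get_journal_download_stats(rows):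
--     """Get download statistics for each journal (group first, then summarize)."""
--     groups = defaultdict(list)
--     for row in rows:
--         groups[row['journal']].append(row)
--
--     result = defaultdict(lambda: {'total': 0, 'downloaded': 0})
--     for journal, group in groups.items():
--         result[journal] = {
--             'total': len(group),
--             'downloaded': sum(1 for r in group
--                               if r.get('downloaded', '').lower() == 'yes'),
--         }
--     return result
-- ===== Notes on version B (the rewrite author's own statement) =====
-- stated objective: alternative
-- what changed: B groups rows by journal in one pass and then computes each journal's total/downloaded counts from its group in a second pass over the groups, instead of A's interleaved per-row increments of a nested counter dict.
import Mathlib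
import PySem

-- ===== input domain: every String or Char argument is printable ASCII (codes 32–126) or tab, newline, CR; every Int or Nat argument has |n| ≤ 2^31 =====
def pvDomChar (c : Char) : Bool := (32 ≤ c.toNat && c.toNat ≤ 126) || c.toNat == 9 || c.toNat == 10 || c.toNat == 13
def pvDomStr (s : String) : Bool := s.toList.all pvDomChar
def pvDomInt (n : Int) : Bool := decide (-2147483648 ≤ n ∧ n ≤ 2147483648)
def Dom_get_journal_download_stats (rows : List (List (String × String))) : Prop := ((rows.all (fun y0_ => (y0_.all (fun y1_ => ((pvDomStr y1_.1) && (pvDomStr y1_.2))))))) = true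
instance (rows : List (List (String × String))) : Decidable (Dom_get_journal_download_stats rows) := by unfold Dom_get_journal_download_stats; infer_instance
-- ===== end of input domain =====

-- B groups rows by journal first and summarizes each group afterwards ('alternative'); equality of RETURN values is proved.

-- shared helper: row.get('downloaded', '').lower() == 'yes'  (dict lookup = first match in the association list)
def pvYes (row : List (String × String)) : Bool :=
  PySem.Str.lower (((row.find? (fun p => p.1 == "downloaded")).map (·.2)).getD "") == "yes"

-- ===== PORT A =====
-- the defaultdict default factory's value {'total': 0, 'downloaded': 0}
def pvDflt : PySem.Dict String Int := PySem.Dict.ofList [("total", 0), ("downloaded", 0)]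

-- one iteration of A's loop body (KeyError on a row without 'journal' is excluded by Pre_, the none branch is unreachable there)
def pvStepA (stats : PySem.Dict String (PySem.Dict String Int)) (row : List (String × String)) :
    PySem.Dict String (PySem.Dict String Int) :=
  match row.find? (fun p => p.1 == "journal") with
  | none => stats
  | some q =>
    let j := q.2
    let stats1 := stats.insert j (((stats.get? j).getD pvDflt).modify "total" 0 (· + 1))
    if pvYes row then
      stats1.insert j (((stats1.get? j).getD pvDflt).modify "downloaded" 0 (· + 1))
    else stats1

def get_journal_download_stats (rows : List (List (String × String))) : List (String × List (String × Int)) :=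
  (rows.foldl pvStepA PySem.Dict.empty).items.map (fun p => (p.1, p.2.items))

-- ===== PORT B =====
-- one iteration of B's grouping loop: groups[row['journal']].append(row)
def pvStepB (g : PySem.Dict String (List (List (String × String)))) (row : List (String × String)) :
    PySem.Dict String (List (List (String × String))) :=
  match row.find? (fun p => p.1 == "journal") with
  | none => g
  | some q => g.modify q.2 [] (· ++ [row])

-- the summary dict built for one group: {'total': len(group), 'downloaded': sum(1 for r in group if …)}
def pvStat (grp : List (List (String × String))) : PySem.Dict String Int :=
  PySem.Dict.ofList [("total", (grp.length : Int)), ("downloaded", ((grp.filter pvYes).length : Int))]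

def get_journal_download_stats_alt (rows : List (List (String × String))) : List (String × List (String × Int)) :=
  let groups := rows.foldl pvStepB PySem.Dict.empty
  let result := groups.items.foldl (fun r p => r.insert p.1 (pvStat p.2)) PySem.Dict.empty
  result.items.map (fun p => (p.1, p.2.items))

-- ===== PRECONDITION & SPEC =====
-- Pre_ excludes rows without a 'journal' key: A raises KeyError there (B does too).
def Pre_get_journal_download_stats (rows : List (List (String × String))) : Prop :=
  ∀ row ∈ rows, "journal" ∈ row.map Prod.fst
instance (rows : List (List (String × String))) : Decidable (Pre_get_journal_download_stats rows) := by unfold Pre_get_journal_download_stats; infer_instance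

def pvWitness_get_journal_download_stats : (List (List (String × String))) :=
  [[("journal", "A"), ("downloaded", "Yes")], [("journal", "B")], [("journal", "A"), ("downloaded", "no")]]

def Spec_get_journal_download_stats (rows : List (List (String × String))) (out : List (String × List (String × Int))) : Prop := out = get_journal_download_stats_alt rows
instance (rows : List (List (String × String))) (out : List (String × List (String × Int))) : Decidable (Spec_get_journal_download_stats rows out) := by unfold Spec_get_journal_download_stats; infer_instance

-- ===== CLAIM (what is proved, stated in full; the proofs are below) =====
def Claim_equal_get_journal_download_stats : Prop := ∀ (rows : List (List (String × String))), Dom_get_journal_download_stats rows → Pre_get_journal_download_stats rows → Spec_get_journal_download_stats rows (get_journal_download_stats rows)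

-- ===== LEMMAS AND PROOFS =====

-- the summary of a whole grouping dict (proof-only abbreviation)
def pvSumm (g : PySem.Dict String (List (List (String × String)))) :
    PySem.Dict String (PySem.Dict String Int) :=
  PySem.Dict.mk (g.items.map (fun p => (p.1, pvStat p.2)))

def pvSt (n m : Int) : PySem.Dict String Int :=
  PySem.Dict.ofList [("total", n), ("downloaded", m)]

theorem pv_get?_mk_map {α β : Type} (l : List (String × α)) (f : α → β) (k : String) :
    (PySem.Dict.mk (l.map (fun p => (p.1, f p.2)))).get? k = ((PySem.Dict.mk l).get? k).map f := by
  induction l with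
  | nil => rfl
  | cons h t ih =>
    rw [List.map_cons, PySem.Dict.get?_mk_cons, PySem.Dict.get?_mk_cons]
    by_cases hk : (h.1 == k) = true
    · simp [hk]
    · simp [hk, ih]

theorem pv_get?_summ (g : PySem.Dict String (List (List (String × String)))) (k : String) :
    (pvSumm g).get? k = (g.get? k).map pvStat := by
  simpa [pvSumm] using pv_get?_mk_map g.items pvStat k

theorem pv_contains_summ (g : PySem.Dict String (List (List (String × String)))) (k : String) :
    (pvSumm g).contains k = g.contains k := by
  rw [PySem.Dict.contains_eq_isSome_get?, PySem.Dict.contains_eq_isSome_get?, pv_get?_summ]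
  cases g.get? k <;> rfl

theorem pv_summ_insert (g : PySem.Dict String (List (List (String × String))))
    (j : String) (v : List (List (String × String))) :
    pvSumm (g.insert j v) = (pvSumm g).insert j (pvStat v) := by
  apply PySem.Dict.ext
  show (g.insert j v).items.map (fun p => (p.1, pvStat p.2)) = ((pvSumm g).insert j (pvStat v)).items
  rw [PySem.Dict.items_insert, PySem.Dict.items_insert, pv_contains_summ]
  by_cases hcj : g.contains j = true
  · simp only [hcj, if_true]
    show _ = ((pvSumm g).items).map (fun p => if (p.1 == j) = true then (j, pvStat v) else p)
    simp only [pvSumm, List.map_map]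
    apply List.map_congr_left
    intro p _
    by_cases hp : p.1 = j <;> simp [hp]
  · simp only [hcj, if_false, Bool.false_eq_true]
    simp [pvSumm]

theorem pv_stat_st (grp : List (List (String × String))) :
    pvStat grp = pvSt (grp.length : Int) ((grp.filter pvYes).length : Int) := rfl

theorem pv_st_total (n m : Int) : (pvSt n m).modify "total" 0 (· + 1) = pvSt (n + 1) m := rfl

theorem pv_st_down (n m : Int) : (pvSt n m).modify "downloaded" 0 (· + 1) = pvSt n (m + 1) := rfl

theorem pv_stat_append (grp : List (List (String × String))) (row : List (String × String)) :
    pvStat (grp ++ [row]) =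
      pvSt ((grp.length : Int) + 1)
        ((grp.filter pvYes).length + (if pvYes row then 1 else 0)) := by
  rw [pv_stat_st]
  by_cases hy : pvYes row = true <;> simp [pvSt, List.filter_append, hy]

-- how A's loop body evaluates when the row has a 'journal' key
theorem pvStepA_some (stats : PySem.Dict String (PySem.Dict String Int))
    (row : List (String × String)) (q : String × String)
    (hq : row.find? (fun p => p.1 == "journal") = some q) :
    pvStepA stats row =
      if pvYes row then
        (stats.insert q.2 (((stats.get? q.2).getD pvDflt).modify "total" 0 (· + 1))).insert q.2
          ((((stats.insert q.2 (((stats.get? q.2).getD pvDflt).modify "total" 0 (· + 1))).get? q.2).getD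
              pvDflt).modify "downloaded" 0 (· + 1))
      else stats.insert q.2 (((stats.get? q.2).getD pvDflt).modify "total" 0 (· + 1)) := by
  unfold pvStepA
  rw [hq]

-- the step lemma: one row advances A's stats exactly as summarizing B's advanced groups does
theorem pv_step (g : PySem.Dict String (List (List (String × String))))
    (row : List (String × String)) (q : String × String)
    (hq : row.find? (fun p => p.1 == "journal") = some q) :
    pvStepA (pvSumm g) row = pvSumm (pvStepB g row) := by
  have hmod : pvStepB g row = g.insert q.2 (g.getD q.2 [] ++ [row]) := by
    unfold pvStepB
    rw [hq]
    rfl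
  have hget : ((pvSumm g).get? q.2).getD pvDflt = pvStat (g.getD q.2 []) := by
    rw [pv_get?_summ, PySem.Dict.getD_eq_get?_getD]
    cases g.get? q.2 <;> rfl
  rw [hmod, pv_summ_insert, pv_stat_append, pvStepA_some (pvSumm g) row q hq]
  rw [hget, pv_stat_st, pv_st_total]
  by_cases hy : pvYes row = true
  · simp only [hy, if_true]
    rw [PySem.Dict.get?_insert_self]
    simp only [Option.getD_some]
    rw [pv_st_down, PySem.Dict.insert_insert_self]
  · simp only [hy, if_false, Bool.false_eq_true]
    norm_num

theorem pv_find_journal (row : List (String × String)) (hr : "journal" ∈ row.map Prod.fst) :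
    ∃ q, row.find? (fun p => p.1 == "journal") = some q := by
  rw [← Option.isSome_iff_exists, List.find?_isSome]
  obtain ⟨p, hp, hpe⟩ := List.mem_map.mp hr
  exact ⟨p, hp, by simp [← hpe]⟩

theorem pv_fold (rows : List (List (String × String)))
    (g : PySem.Dict String (List (List (String × String))))
    (hpre : ∀ row ∈ rows, "journal" ∈ row.map Prod.fst) :
    rows.foldl pvStepA (pvSumm g) = pvSumm (rows.foldl pvStepB g) := by
  induction rows generalizing g with
  | nil => rfl
  | cons r t ih =>
    obtain ⟨q, hq⟩ := pv_find_journal r (hpre r (List.mem_cons_self ..))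
    simp only [List.foldl_cons, pv_step g r q hq]
    exact ih _ (fun row hrow => hpre row (List.mem_cons_of_mem _ hrow))

theorem pv_nodup_keys (rows : List (List (String × String)))
    (hpre : ∀ row ∈ rows, "journal" ∈ row.map Prod.fst) :
    (rows.foldl pvStepB PySem.Dict.empty).keys.Nodup := by
  have hcong : rows.foldl pvStepB PySem.Dict.empty =
      rows.foldl (fun g row => g.modify (((row.find? (fun p => p.1 == "journal")).map (·.2)).getD "")
        [] ((fun (_ : PySem.Dict String (List (List (String × String)))) (row : List (String × String))
              (v : List (List (String × String))) => v ++ [row]) g row)) PySem.Dict.empty := by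
    apply PySem.List.foldl_congr_mem
    intro acc x hx
    obtain ⟨q, hq⟩ := pv_find_journal x (hpre x hx)
    simp [pvStepB, hq]
  rw [hcong]
  exact PySem.Dict.nodup_keys_foldl_modify_key rows _ [] _ _ PySem.Dict.nodup_keys_empty

-- ===== VERDICT (by name: the statement is the Claim_ definition above) =====
theorem get_journal_download_stats_spec : Claim_equal_get_journal_download_stats := by
  intro rows _ hpre
  unfold Spec_get_journal_download_stats
  unfold get_journal_download_stats get_journal_download_stats_alt
  have hfold := pv_fold rows PySem.Dict.empty hpre
  have hempty : pvSumm PySem.Dict.empty = PySem.Dict.empty := rfl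
  rw [hempty] at hfold
  rw [hfold]
  have hres : ((rows.foldl pvStepB PySem.Dict.empty).items.foldl
        (fun r p => r.insert p.1 (pvStat p.2)) PySem.Dict.empty).items
      = (rows.foldl pvStepB PySem.Dict.empty).items.map (fun p => (p.1, pvStat p.2)) := by
    have := PySem.Dict.items_foldl_insert_fresh
      (l := (rows.foldl pvStepB PySem.Dict.empty).items) (d := PySem.Dict.empty)
      (k := fun p => p.1) (v := fun p => pvStat p.2)
      (by intro a _; exact PySem.Dict.contains_empty ..)
      (by simpa using pv_nodup_keys rows hpre)
    simpa using this
  show (pvSumm (rows.foldl pvStepB PySem.Dict.empty)).items.map (fun p => (p.1, p.2.items))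
      = ((rows.foldl pvStepB PySem.Dict.empty).items.foldl
          (fun r p => r.insert p.1 (pvStat p.2)) PySem.Dict.empty).items.map (fun p => (p.1, p.2.items))
  rw [hres]
  simp [pvSumm, List.map_map]
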